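-- pv_equiv track=rewrite | github.com/h3nnn4n/petri-net-simulator | simulator.py | get_precondition_matrix
-- ===== SOURCE A (Python) =====
-- def get_precondition_matrix(net):
--     places = net[0]
--     trans = net[1]
--     edges = net[2]
--
--     matrix = []
--
--     for i in range(len(places)):
--         matrix.append([0 for x in range(len(trans))])
--
--     pl = dict(zip(places,[x for x in range(len(places))]))
--     tr = dict(zip(trans ,[x for x in range(len(trans ))]))
--
--     for edge in edges:
--         if edge[0] in places:
--             matrix[pl[edge[0]]][tr[edge[1]]] = edge[2]
--
--     return matrix
-- ===== SOURCE B (Python) =====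
-- def get_precondition_matrix(net):
--     places, trans, edges = net
--     pl = {p: i for i, p in enumerate(places)}
--     tr = {t: j for j, t in enumerate(trans)}
--     cells = {}
--     for edge in edges:
--         if edge[0] in pl:
--             cells[(pl[edge[0]], tr[edge[1]])] = edge[2]
--     return [[cells.get((i, j), 0) for j in range(len(trans))]
--             for i in range(len(places))]
-- ===== Notes on version B (the rewrite author's own statement) =====
-- stated objective: alternative
-- what changed: B replaces A's scatter-into-a-preallocated-zero-matrix with a build-table-then-emit decomposition: it collects the edge weights in a dict keyed by (place index, transition index) and then emits the whole matrix in one nested comprehension with d.get((i,j), 0).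
import Mathlib
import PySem

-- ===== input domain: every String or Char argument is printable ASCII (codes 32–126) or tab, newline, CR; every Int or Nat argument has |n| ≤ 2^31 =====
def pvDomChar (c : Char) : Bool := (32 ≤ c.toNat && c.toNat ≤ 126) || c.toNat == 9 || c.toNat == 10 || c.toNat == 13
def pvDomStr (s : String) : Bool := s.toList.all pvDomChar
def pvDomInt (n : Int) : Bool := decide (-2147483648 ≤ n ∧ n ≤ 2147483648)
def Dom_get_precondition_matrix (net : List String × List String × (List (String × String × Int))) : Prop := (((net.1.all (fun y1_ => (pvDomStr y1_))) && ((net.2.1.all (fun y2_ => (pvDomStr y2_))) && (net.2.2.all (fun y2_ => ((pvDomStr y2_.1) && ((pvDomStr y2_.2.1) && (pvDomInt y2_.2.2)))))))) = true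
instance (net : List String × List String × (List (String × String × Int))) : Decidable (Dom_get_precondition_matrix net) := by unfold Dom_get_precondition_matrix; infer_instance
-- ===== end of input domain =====

-- B builds a dict of (place index, transition index) ↦ weight and then emits the matrix
-- in one nested comprehension, instead of A's scatter into a preallocated zero matrix.

-- ===== PORT A =====
def get_precondition_matrix (net : List String × List String × (List (String × String × Int))) : List (List Int) :=
  let places := net.1
  let trans := net.2.1
  let edges := net.2.2
  -- for i in range(len(places)): matrix.append([0 for x in range(len(trans))])
  let matrix : List (List Int) :=
    (PySem.List.pyRange 0 places.length 1).foldl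
      (fun m _ => m ++ [(PySem.List.pyRange 0 trans.length 1).map (fun _ => (0 : Int))]) []
  let pl : PySem.Dict String Int :=
    PySem.Dict.ofList (places.zip (PySem.List.pyRange 0 places.length 1))
  let tr : PySem.Dict String Int :=
    PySem.Dict.ofList (trans.zip (PySem.List.pyRange 0 trans.length 1))
  edges.foldl (fun m e =>
    if e.1 ∈ places then
      match pl.get? e.1, tr.get? e.2.1 with
      | some i, some j => m.set i.toNat ((m.getD i.toNat []).set j.toNat e.2.2)
      | _, _ => m        -- tr[edge[1]] raises KeyError in Python: excluded by Pre_
    else m) matrix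

-- ===== PORT B =====
def get_precondition_matrix_alt (net : List String × List String × (List (String × String × Int))) : List (List Int) :=
  let places := net.1
  let trans := net.2.1
  let edges := net.2.2
  let pl : PySem.Dict String Int :=
    (PySem.List.enumerate places).foldl (fun d p => d.insert p.2 p.1) PySem.Dict.empty
  let tr : PySem.Dict String Int :=
    (PySem.List.enumerate trans).foldl (fun d p => d.insert p.2 p.1) PySem.Dict.empty
  let cells : PySem.Dict (Int × Int) Int :=
    edges.foldl (fun c e =>
      if pl.contains e.1 then
        match pl.get? e.1 with
        | some i =>
          match tr.get? e.2.1 with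
          | some j => c.insert (i, j) e.2.2
          | none => c  -- tr[edge[1]] raises KeyError in Python: excluded by Pre_
        | none => c
      else c) PySem.Dict.empty
  (PySem.List.pyRange 0 places.length 1).map (fun i =>
    (PySem.List.pyRange 0 trans.length 1).map (fun j => cells.getD (i, j) 0))

-- ===== PRECONDITION & SPEC =====
-- Pre_ excludes exactly the inputs where Python A raises KeyError: an edge whose source is a
-- known place but whose target transition is not in trans (B raises KeyError there too).
def Pre_get_precondition_matrix (net : List String × List String × (List (String × String × Int))) : Prop :=
  ∀ e ∈ net.2.2, e.1 ∈ net.1 → e.2.1 ∈ net.2.1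
instance (net : List String × List String × (List (String × String × Int))) : Decidable (Pre_get_precondition_matrix net) := by unfold Pre_get_precondition_matrix; infer_instance
def pvWitness_get_precondition_matrix : (List String × List String × (List (String × String × Int))) :=
  (["p1", "p2"], ["t1"], [("p1", "t1", 2), ("q", "zz", 3)])
def Spec_get_precondition_matrix (net : List String × List String × (List (String × String × Int))) (out : List (List Int)) : Prop := out = get_precondition_matrix_alt net
instance (net : List String × List String × (List (String × String × Int))) (out : List (List Int)) : Decidable (Spec_get_precondition_matrix net out) := by unfold Spec_get_precondition_matrix; infer_instance

-- ===== CLAIM (what is proved, stated in full; the proofs are below) =====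
def Claim_equal_get_precondition_matrix : Prop := ∀ (net : List String × List String × (List (String × String × Int))), Dom_get_precondition_matrix net → Pre_get_precondition_matrix net → Spec_get_precondition_matrix net (get_precondition_matrix net)

-- ===== LEMMAS AND PROOFS =====

-- the emitted matrix of a cell dict
def pvEmit (Pn Tn : Nat) (c : PySem.Dict (Int × Int) Int) : List (List Int) :=
  (PySem.List.pyRange 0 Pn 1).map (fun i =>
    (PySem.List.pyRange 0 Tn 1).map (fun j => c.getD (i, j) 0))

theorem pv_zip_eq_enum (xs : List String) (s : Int) :
    xs.zip (PySem.List.pyRange s (s + xs.length) 1)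
      = (PySem.List.enumerate xs s).map (fun p => (p.2, p.1)) := by
  induction xs generalizing s with
  | nil => simp [PySem.List.enumerate_nil, PySem.List.pyRange_one_eq_nil]
  | cons x xs ih =>
    have h : s < s + ((x :: xs).length : Int) := by simp
    rw [PySem.List.pyRange_one_cons h, PySem.List.enumerate_cons]
    have harith : s + ((x :: xs).length : Int) = (s + 1) + (xs.length : Int) := by
      simp; omega
    simp only [List.zip_cons_cons, List.map_cons, harith, ih]

theorem pv_contains_enum_fold (xs : List String) (d : PySem.Dict String Int) (k : String) (s : Int) :
    ((PySem.List.enumerate xs s).foldl (fun d p => d.insert p.2 p.1) d).contains k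
      = (decide (k ∈ xs) || d.contains k) := by
  induction xs generalizing s d with
  | nil => simp [PySem.List.enumerate_nil]
  | cons x xs ih =>
    rw [PySem.List.enumerate_cons]
    simp only [List.foldl_cons, ih, PySem.Dict.contains_insert]
    by_cases hk : k = x <;>
      simp [hk, List.mem_cons, Bool.or_comm, Bool.or_left_comm]

theorem pv_get?_enum_fold_bound (xs : List String) (d : PySem.Dict String Int) (k : String)
    (v s : Int)
    (h : ((PySem.List.enumerate xs s).foldl (fun d p => d.insert p.2 p.1) d).get? k = some v) :
    (s ≤ v ∧ v < s + xs.length) ∨ d.get? k = some v := by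
  induction xs generalizing s d with
  | nil => simp [PySem.List.enumerate_nil] at h; right; exact h
  | cons x xs ih =>
    rw [PySem.List.enumerate_cons] at h
    simp only [List.foldl_cons] at h
    rcases ih _ _ h with h1 | h2
    · left; simp; omega
    · rw [PySem.Dict.get?_insert] at h2
      by_cases hk : k = x
      · simp [hk] at h2; left; simp; omega
      · simp [hk] at h2; right; exact h2

theorem pv_foldl_append_const (l : List Int) (r : List Int) (acc : List (List Int)) :
    l.foldl (fun m (_ : Int) => m ++ [r]) acc = acc ++ l.map (fun _ => r) := by
  induction l generalizing acc with
  | nil => simp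
  | cons x l ih => simp [ih]

theorem pv_emit_length (Pn Tn : Nat) (c : PySem.Dict (Int × Int) Int) :
    (pvEmit Pn Tn c).length = Pn := by
  simp [pvEmit, PySem.List.length_pyRange_one]

theorem pv_emit_insert (Pn Tn : Nat) (c : PySem.Dict (Int × Int) Int) (i j v : Int)
    (h0i : 0 ≤ i) (hiP : i < Pn) (h0j : 0 ≤ j) (hjT : j < Tn) :
    pvEmit Pn Tn (c.insert (i, j) v)
      = (pvEmit Pn Tn c).set i.toNat (((pvEmit Pn Tn c).getD i.toNat []).set j.toNat v) := by
  have hiN : i.toNat < Pn := by omega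
  have hjN : j.toNat < Tn := by omega
  have hlen := pv_emit_length Pn Tn c
  have hgetD : (pvEmit Pn Tn c).getD i.toNat [] = (pvEmit Pn Tn c)[i.toNat]'(by omega) := by
    exact List.getD_eq_getElem _ _ (by omega)
  rw [hgetD]
  apply List.ext_getElem
  · rw [pv_emit_length, List.length_set, pv_emit_length]
  · intro n h1 h2
    have hn : n < Pn := by
      rw [pv_emit_length] at h1; exact h1
    have hgetc : ∀ (c' : PySem.Dict (Int × Int) Int) (m : Nat) (hm : m < Pn),
        (pvEmit Pn Tn c')[m]'(by simp [pv_emit_length]; omega)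
          = (PySem.List.pyRange 0 Tn 1).map (fun j => c'.getD ((m : Int), j) 0) := by
      intro c' m hm
      simp [pvEmit, List.getElem_map, PySem.List.getElem_pyRange_one]
    rw [List.getElem_set]
    by_cases hni : i.toNat = n
    · subst hni
      rw [if_pos rfl, hgetc _ _ hiN, hgetc _ _ hiN]
      have hcast : ((i.toNat : Int)) = i := Int.toNat_of_nonneg h0i
      apply List.ext_getElem
      · simp
      · intro m hm1 hm2
        have hmT : m < Tn := by simpa [PySem.List.length_pyRange_one] using hm1
        rw [List.getElem_set]
        simp only [List.getElem_map, PySem.List.getElem_pyRange_one,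
          PySem.Dict.getD_insert, zero_add, hcast, Prod.mk.injEq]
        have hiff : ((m : Int) = j) ↔ (j.toNat = m) := by omega
        simp [hiff]
    · rw [if_neg hni, hgetc _ _ hn, hgetc _ _ hn]
      apply List.map_congr_left
      intro b _
      rw [PySem.Dict.getD_insert, if_neg]
      intro hEq
      have h1 : ((n : Int)) = i := congrArg Prod.fst hEq
      omega

theorem pv_fold_invariant (places trans : List String)
    (pl tr : PySem.Dict String Int)
    (hplc : ∀ k, pl.contains k = decide (k ∈ places))
    (hplb : ∀ k v, pl.get? k = some v → 0 ≤ v ∧ v < places.length)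
    (htrc : ∀ k, tr.contains k = decide (k ∈ trans))
    (htrb : ∀ k v, tr.get? k = some v → 0 ≤ v ∧ v < trans.length)
    (edges : List (String × String × Int))
    (hpre : ∀ e ∈ edges, e.1 ∈ places → e.2.1 ∈ trans)
    (c : PySem.Dict (Int × Int) Int) (m : List (List Int))
    (hm : m = pvEmit places.length trans.length c) :
    edges.foldl (fun m e =>
        if e.1 ∈ places then
          match pl.get? e.1, tr.get? e.2.1 with
          | some i, some j => m.set i.toNat ((m.getD i.toNat []).set j.toNat e.2.2)
          | _, _ => m
        else m) m
      = pvEmit places.length trans.length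
          (edges.foldl (fun c e =>
            if pl.contains e.1 then
              match pl.get? e.1 with
              | some i =>
                match tr.get? e.2.1 with
                | some j => c.insert (i, j) e.2.2
                | none => c
              | none => c
            else c) c) := by
  induction edges generalizing c m with
  | nil => simpa using hm
  | cons e es ih =>
    simp only [List.foldl_cons]
    by_cases hmem : e.1 ∈ places
    · rw [if_pos hmem, if_pos (by rw [hplc]; exact decide_eq_true hmem)]
      have hplsome : (pl.get? e.1).isSome := by
        rw [← PySem.Dict.contains_eq_isSome_get?, hplc]
        exact decide_eq_true hmem
      obtain ⟨i, hi⟩ := Option.isSome_iff_exists.mp hplsome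
      have htrsome : (tr.get? e.2.1).isSome := by
        rw [← PySem.Dict.contains_eq_isSome_get?, htrc]
        exact decide_eq_true (hpre e (by simp) hmem)
      obtain ⟨j, hj⟩ := Option.isSome_iff_exists.mp htrsome
      rw [hi, hj]
      apply ih (fun e' he' => hpre e' (by simp [he']))
      obtain ⟨hi0, hiP⟩ := hplb _ _ hi
      obtain ⟨hj0, hjT⟩ := htrb _ _ hj
      rw [hm, pv_emit_insert _ _ _ _ _ _ hi0 hiP hj0 hjT]
    · rw [if_neg hmem, if_neg (by rw [hplc]; simpa using hmem)]
      exact ih (fun e' he' => hpre e' (by simp [he'])) c m hm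

theorem pv_emit_empty (Pn Tn : Nat) :
    pvEmit Pn Tn PySem.Dict.empty
      = (PySem.List.pyRange 0 Pn 1).map
          (fun _ => (PySem.List.pyRange 0 Tn 1).map (fun _ => (0 : Int))) := by
  simp [pvEmit, PySem.Dict.getD_empty]

-- ===== VERDICT (by name: the statement is the Claim_ definition above) =====
theorem get_precondition_matrix_spec : Claim_equal_get_precondition_matrix := by
  intro net _hdom hpre
  unfold Spec_get_precondition_matrix get_precondition_matrix get_precondition_matrix_alt
  obtain ⟨places, trans, edges⟩ := net
  simp only
  have hzipP := pv_zip_eq_enum places 0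
  have hzipT := pv_zip_eq_enum trans 0
  rw [zero_add] at hzipP hzipT
  have hdictP : PySem.Dict.ofList (places.zip (PySem.List.pyRange 0 places.length 1))
      = (PySem.List.enumerate places).foldl (fun d p => d.insert p.2 p.1) PySem.Dict.empty := by
    rw [hzipP]
    simp [PySem.Dict.ofList, PySem.Dict.update, List.foldl_map]
  have hdictT : PySem.Dict.ofList (trans.zip (PySem.List.pyRange 0 trans.length 1))
      = (PySem.List.enumerate trans).foldl (fun d p => d.insert p.2 p.1) PySem.Dict.empty := by
    rw [hzipT]
    simp [PySem.Dict.ofList, PySem.Dict.update, List.foldl_map]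
  rw [hdictP, hdictT]
  set pl := (PySem.List.enumerate places).foldl (fun d p => d.insert p.2 p.1) PySem.Dict.empty with hpl
  set tr := (PySem.List.enumerate trans).foldl (fun d p => d.insert p.2 p.1) PySem.Dict.empty with htr
  have hplc : ∀ k, pl.contains k = decide (k ∈ places) := by
    intro k; rw [hpl, pv_contains_enum_fold]; simp [PySem.Dict.contains_empty]
  have htrc : ∀ k, tr.contains k = decide (k ∈ trans) := by
    intro k; rw [htr, pv_contains_enum_fold]; simp [PySem.Dict.contains_empty]
  have hplb : ∀ k v, pl.get? k = some v → 0 ≤ v ∧ v < places.length := by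
    intro k v h
    rcases pv_get?_enum_fold_bound places PySem.Dict.empty k v 0 (hpl ▸ h) with h1 | h2
    · omega
    · simp [PySem.Dict.get?_empty] at h2
  have htrb : ∀ k v, tr.get? k = some v → 0 ≤ v ∧ v < trans.length := by
    intro k v h
    rcases pv_get?_enum_fold_bound trans PySem.Dict.empty k v 0 (htr ▸ h) with h1 | h2
    · omega
    · simp [PySem.Dict.get?_empty] at h2
  rw [pv_fold_invariant places trans pl tr hplc hplb htrc htrb edges hpre PySem.Dict.empty _
    (by rw [pv_emit_empty, pv_foldl_append_const]; simp)]
  simp [pvEmit]
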